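-- pv_equiv track=rewrite | github.com/hyundoria/BOJ | 백준/Gold/24430. 알고리즘 수업 － 행렬 경로 문제 7/알고리즘 수업 － 행렬 경로 문제 7.py | matrix_path
-- ===== SOURCE A (Python) =====
-- def matrix_path(arr, n, m, p):
--
--     dp = [[(0,0)  for _ in range(n+1)] for _ in range(n+1)]
--
--     points_set = set(p)
--
--     for i in range(1, n+1):
--         for j in range(1, n+1):
--
--             up = dp[i-1][j]
--             left = dp[i][j-1]
--
--             if up[0] > left[0]:
--                 best = up
--             elif up[0] < left[0]:
--                 best = left
--             else:
--                 if up[1] > left[1]: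
--                     best = up
--                 else:
--                     best = left
--
--             count = best[1]
--
--             if (i,j) in points_set:
--                 count += 1
--
--             dp[i][j] =  (best[0] + arr[i-1][j-1], count)
--
--
--     return dp[n][n]
-- ===== SOURCE B (Python) =====
-- def matrix_path(arr, n, m, p):
--     pts = set(p)
--     memo = {}
--
--     def solve(i, j):
--         key = (i, j)
--         if key in memo:
--             return memo[key]
--         if i == 0 or j == 0:
--             res = (0, 0)
--         else:
--             us, uc = solve(i - 1, j)
--             ls, lc = solve(i, j - 1)
--             if us > ls or (us == ls and uc > lc):
--                 s, c = us, uc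
--             else:
--                 s, c = ls, lc
--             res = (s + arr[i - 1][j - 1], c + ((i, j) in pts))
--         memo[key] = res
--         return res
--
--     return solve(n, n)
-- ===== Notes on version B (the rewrite author's own statement) =====
-- stated objective: alternative
-- what changed: Replaced A's bottom-up table sweep by top-down memoized recursion: solve(i,j) recurses on the two predecessors with the same tie-break and caches results in a dict, so no dp table and no index loops exist.
import Mathlib
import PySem

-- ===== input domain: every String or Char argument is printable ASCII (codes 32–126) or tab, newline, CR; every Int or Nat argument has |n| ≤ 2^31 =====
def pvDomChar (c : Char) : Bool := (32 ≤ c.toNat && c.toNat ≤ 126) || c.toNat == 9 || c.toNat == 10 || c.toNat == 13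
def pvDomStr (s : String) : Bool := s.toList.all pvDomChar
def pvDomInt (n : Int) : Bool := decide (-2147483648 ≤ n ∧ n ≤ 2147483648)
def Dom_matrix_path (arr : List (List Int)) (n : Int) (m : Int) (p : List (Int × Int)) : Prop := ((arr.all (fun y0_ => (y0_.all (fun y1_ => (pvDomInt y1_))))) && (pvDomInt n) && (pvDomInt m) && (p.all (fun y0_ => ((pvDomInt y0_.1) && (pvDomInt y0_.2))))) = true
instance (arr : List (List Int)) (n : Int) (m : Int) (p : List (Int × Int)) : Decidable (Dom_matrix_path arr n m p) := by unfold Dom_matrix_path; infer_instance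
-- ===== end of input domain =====

-- B replaces A's bottom-up table sweep by top-down memoized recursion over the two predecessor
-- cells, caching results in a dict (objective: alternative; same asymptotic cost).

-- ===== PORT A =====
-- All dp/arr indexing is in range and nonnegative under Pre_, so pyGetD's default is never used there.
def aStep (arr : List (List Int)) (pts : PySem.Set (Int × Int)) (i : Int)
    (dp : List (List (Int × Int))) (j : Int) : List (List (Int × Int)) :=
  let up := PySem.List.pyGetD (PySem.List.pyGetD dp (i-1) []) j ((0:Int), (0:Int))
  let left := PySem.List.pyGetD (PySem.List.pyGetD dp i []) (j-1) ((0:Int), (0:Int))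
  let best := if up.1 > left.1 then up
              else if up.1 < left.1 then left
              else if up.2 > left.2 then up else left
  let count := best.2
  let count := if (i, j) ∈ pts then count + 1 else count
  PySem.List.pySetD dp i
    (PySem.List.pySetD (PySem.List.pyGetD dp i []) j
      (best.1 + PySem.List.pyGetD (PySem.List.pyGetD arr (i-1) []) (j-1) 0, count))

def aRow (arr : List (List Int)) (pts : PySem.Set (Int × Int)) (n : Int)
    (dp : List (List (Int × Int))) (i : Int) : List (List (Int × Int)) :=
  (PySem.List.pyRange 1 (n+1) 1).foldl (aStep arr pts i) dp

def matrix_path (arr : List (List Int)) (n : Int) (m : Int) (p : List (Int × Int)) : Int × Int :=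
  let dp0 : List (List (Int × Int)) :=
    (PySem.List.pyRange 0 (n+1) 1).map (fun _ =>
      (PySem.List.pyRange 0 (n+1) 1).map (fun _ => ((0:Int), (0:Int))))
  let pts : PySem.Set (Int × Int) := PySem.Set.ofList p
  let dp := (PySem.List.pyRange 1 (n+1) 1).foldl (aRow arr pts n) dp0
  PySem.List.pyGetD (PySem.List.pyGetD dp n []) n ((0:Int), (0:Int))

-- ===== PORT B =====
-- Source B's solve(i, j): check the memo, base case on the first row/column, otherwise recurse on the
-- two predecessors with A's tie-break, then store the result in the memo dict and return it.
-- Indices are Nat here: under Pre_ they are nonnegative (for n < 0 Python B raises RecursionError,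
-- excluded by Pre_); the recursion structure is exactly Source B's.
def solveB (arr : List (List Int)) (pts : PySem.Set (Int × Int)) :
    Nat → Nat → PySem.Dict (Int × Int) (Int × Int) →
    (Int × Int) × PySem.Dict (Int × Int) (Int × Int)
  | i, j, memo =>
    match memo.get? ((i:Int), (j:Int)) with
    | some v => (v, memo)
    | none =>
      if _h : i = 0 ∨ j = 0 then
        ((0, 0), memo.insert ((i:Int), (j:Int)) (0, 0))
      else
        let u := solveB arr pts (i-1) j memo
        let l := solveB arr pts i (j-1) u.2
        let sc := if u.1.1 > l.1.1 ∨ (u.1.1 = l.1.1 ∧ u.1.2 > l.1.2) then u.1 else l.1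
        let res := (sc.1 + PySem.List.pyGetD (PySem.List.pyGetD arr ((i:Int)-1) []) ((j:Int)-1) 0,
                    sc.2 + (if ((i:Int), (j:Int)) ∈ pts then 1 else 0))
        (res, l.2.insert ((i:Int), (j:Int)) res)
  termination_by i j _ => (i, j)
  decreasing_by
  · exact Prod.Lex.left _ _ (by omega)
  · exact Prod.Lex.right _ (by omega)

def matrix_path_alt (arr : List (List Int)) (n : Int) (m : Int) (p : List (Int × Int)) : Int × Int :=
  let pts : PySem.Set (Int × Int) := PySem.Set.ofList p
  (solveB arr pts n.toNat n.toNat PySem.Dict.empty).1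

-- ===== PRECONDITION & SPEC =====
-- Exactly where Python A returns: n ≥ 0 and the first n rows of arr have at least n entries each
-- (otherwise arr[i-1][j-1] or dp[n][n] raises IndexError).
def Pre_matrix_path (arr : List (List Int)) (n : Int) (m : Int) (p : List (Int × Int)) : Prop :=
  0 ≤ n ∧ n ≤ (arr.length : Int) ∧ ∀ row ∈ arr.take n.toNat, n ≤ (row.length : Int)
instance (arr : List (List Int)) (n : Int) (m : Int) (p : List (Int × Int)) : Decidable (Pre_matrix_path arr n m p) := by unfold Pre_matrix_path; infer_instance

def pvWitness_matrix_path : List (List Int) × Int × Int × (List (Int × Int)) :=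
  ([[3, 1], [2, 4]], 2, 2, [(1, 1), (2, 2)])

def Spec_matrix_path (arr : List (List Int)) (n : Int) (m : Int) (p : List (Int × Int)) (out : Int × Int) : Prop := out = matrix_path_alt arr n m p
instance (arr : List (List Int)) (n : Int) (m : Int) (p : List (Int × Int)) (out : Int × Int) : Decidable (Spec_matrix_path arr n m p out) := by unfold Spec_matrix_path; infer_instance

-- ===== CLAIM (what is proved, stated in full; the proofs are below) =====
def Claim_equal_matrix_path : Prop := ∀ (arr : List (List Int)) (n : Int) (m : Int) (p : List (Int × Int)), Dom_matrix_path arr n m p → Pre_matrix_path arr n m p → Spec_matrix_path arr n m p (matrix_path arr n m p)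

-- ===== LEMMAS AND PROOFS =====

-- Python's lexicographic "pick up iff strictly greater" as one function (left-preferring on ties).
def pyMaxPair (a b : Int × Int) : Int × Int :=
  if a.1 < b.1 ∨ (a.1 = b.1 ∧ a.2 < b.2) then b else a

-- The common DP recurrence both programs compute: pvF i j is the value of cell (i, j).
def pvF (arr : List (List Int)) (pts : PySem.Set (Int × Int)) : Nat → Nat → Int × Int
  | 0, _ => ((0:Int), (0:Int))
  | _+1, 0 => ((0:Int), (0:Int))
  | i+1, j+1 =>
    let up := pvF arr pts i (j+1)
    let left := pvF arr pts (i+1) j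
    let best := pyMaxPair left up
    (best.1 + PySem.List.pyGetD (PySem.List.pyGetD arr (i:Int) []) (j:Int) 0,
     best.2 + (if (((i:Int)+1), ((j:Int)+1)) ∈ pts then 1 else 0))
  termination_by i j => (i, j)

theorem pvF_zero_right (arr : List (List Int)) (pts : PySem.Set (Int × Int)) (i : Nat) :
    pvF arr pts i 0 = ((0:Int), (0:Int)) := by
  cases i <;> simp [pvF]

theorem cascade_eq_pyMaxPair (up left : Int × Int) :
    (if up.1 > left.1 then up
     else if up.1 < left.1 then left
     else if up.2 > left.2 then up else left) = pyMaxPair left up := by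
  unfold pyMaxPair
  split_ifs with h1 h2 h3 h4 h4 h4 <;> first | rfl | (exfalso; omega)

theorem set_map_range {α : Type} (L r : Nat) (g : Nat → α) (v : α) (hr : r < L) :
    ((List.range L).map g).set r v
      = (List.range L).map (fun x => if x = r then v else g x) := by
  apply List.ext_getElem
  · simp
  · intro k h1 h2
    simp only [List.getElem_set, List.getElem_map, List.getElem_range]
    by_cases hk : r = k
    · simp [hk]
    · simp [hk, Ne.symm hk]

-- ---- B side: the memo invariant and correctness of solveB ----

def MemoOK (arr : List (List Int)) (pts : PySem.Set (Int × Int))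
    (memo : PySem.Dict (Int × Int) (Int × Int)) : Prop :=
  ∀ (i j : Nat) (v : Int × Int), memo.get? ((i:Int), (j:Int)) = some v → v = pvF arr pts i j

theorem memoOK_insert (arr : List (List Int)) (pts : PySem.Set (Int × Int))
    (memo : PySem.Dict (Int × Int) (Int × Int)) (i j : Nat)
    (h : MemoOK arr pts memo) :
    MemoOK arr pts (memo.insert ((i:Int), (j:Int)) (pvF arr pts i j)) := by
  intro i' j' v hv
  rw [PySem.Dict.get?_insert] at hv
  split_ifs at hv with heq
  · obtain ⟨h1, h2⟩ := Prod.mk.injEq .. ▸ heq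
    cases hv
    have : i' = i := by exact_mod_cast h1
    have : j' = j := by exact_mod_cast h2
    subst_vars; rfl
  · exact h i' j' v hv

theorem pick_eq_pyMaxPair (up left : Int × Int) :
    (if up.1 > left.1 ∨ (up.1 = left.1 ∧ up.2 > left.2) then up else left)
      = pyMaxPair left up := by
  unfold pyMaxPair
  split_ifs with h1 h2 <;> first | rfl | (exfalso; omega)

theorem solveB_correct (arr : List (List Int)) (pts : PySem.Set (Int × Int)) :
    ∀ (s i j : Nat), i + j = s →
    ∀ (memo : PySem.Dict (Int × Int) (Int × Int)), MemoOK arr pts memo →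
      (solveB arr pts i j memo).1 = pvF arr pts i j ∧
      MemoOK arr pts (solveB arr pts i j memo).2 := by
  intro s
  induction s using Nat.strong_induction_on with
  | _ s ih =>
    intro i j hs memo hm
    rw [solveB]
    cases hg : memo.get? ((i:Int), (j:Int)) with
    | some v => exact ⟨hm i j v hg, hm⟩
    | none =>
      by_cases hbase : i = 0 ∨ j = 0
      · rw [dif_pos hbase]
        have hz : pvF arr pts i j = ((0:Int), (0:Int)) := by
          rcases hbase with h | h
          · subst h; simp [pvF]
          · subst h; exact pvF_zero_right arr pts i
        exact ⟨hz.symm, hz ▸ memoOK_insert arr pts memo i j hm⟩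
      · rw [dif_neg hbase]
        push_neg at hbase
        obtain ⟨hi, hj⟩ := hbase
        obtain ⟨i', rfl⟩ := Nat.exists_eq_succ_of_ne_zero hi
        obtain ⟨j', rfl⟩ := Nat.exists_eq_succ_of_ne_zero hj
        have hu := ih (i' + (j'+1)) (by omega) i' (j'+1) rfl memo hm
        have hl := ih ((i'+1) + j') (by omega) (i'+1) j' rfl _ hu.2
        simp only [Nat.succ_sub_one, Nat.succ_eq_add_one]
        rw [hu.1, hl.1, pick_eq_pyMaxPair]
        have hres :
            ((pyMaxPair (pvF arr pts (i'+1) j') (pvF arr pts i' (j'+1))).1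
               + PySem.List.pyGetD (PySem.List.pyGetD arr (((i'+1:Nat):Int)-1) []) (((j'+1:Nat):Int)-1) 0,
             (pyMaxPair (pvF arr pts (i'+1) j') (pvF arr pts i' (j'+1))).2
               + (if (((i'+1:Nat):Int), ((j'+1:Nat):Int)) ∈ pts then 1 else 0))
            = pvF arr pts (i'+1) (j'+1) := by
          conv_rhs => rw [pvF]
          have h1 : ((i'+1 : Nat) : Int) - 1 = ((i' : Nat) : Int) := by push_cast; ring
          have h2 : ((j'+1 : Nat) : Int) - 1 = ((j' : Nat) : Int) := by push_cast; ring
          rw [h1, h2,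
              show ((((i'+1):Nat):Int), (((j'+1):Nat):Int))
                = ((((i':Nat):Int) + 1), (((j':Nat):Int) + 1)) by push_cast; rfl]
        rw [hres]
        exact ⟨rfl, memoOK_insert arr pts _ (i'+1) (j'+1) hl.2⟩

-- ---- A side ----

-- dp during A's sweep: rows below i are final, row i is final up to column s, rest untouched.
def pvE (arr : List (List Int)) (pts : PySem.Set (Int × Int)) (N i s : Nat) : List (List (Int × Int)) :=
  (List.range (N+1)).map (fun r => (List.range (N+1)).map (fun c =>
    if r < i then pvF arr pts r c
    else if r = i ∧ c ≤ s then pvF arr pts i c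
    else ((0:Int), (0:Int))))

theorem pvE_row (arr : List (List Int)) (pts : PySem.Set (Int × Int)) (N i s r : Nat)
    (hr : r < N+1) :
    PySem.List.pyGetD (pvE arr pts N i s) (↑r) []
      = (List.range (N+1)).map (fun c =>
          if r < i then pvF arr pts r c
          else if r = i ∧ c ≤ s then pvF arr pts i c
          else ((0:Int), (0:Int))) := by
  unfold pvE
  rw [PySem.List.pyGetD_natCast, PySem.List.getD_map_range _ _ _ _ hr]

theorem pvE_getD (arr : List (List Int)) (pts : PySem.Set (Int × Int)) (N i s r c : Nat)
    (hr : r < N+1) (hc : c < N+1) :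
    PySem.List.pyGetD (PySem.List.pyGetD (pvE arr pts N i s) (↑r) []) (↑c) ((0:Int), (0:Int))
      = (if r < i then pvF arr pts r c
         else if r = i ∧ c ≤ s then pvF arr pts i c
         else ((0:Int), (0:Int))) := by
  rw [pvE_row arr pts N i s r hr, PySem.List.pyGetD_natCast,
      PySem.List.getD_map_range _ _ _ _ hc]

theorem pvE_shift (arr : List (List Int)) (pts : PySem.Set (Int × Int)) (N t : Nat) :
    pvE arr pts N t N = pvE arr pts N (t+1) 0 := by
  unfold pvE
  apply List.map_congr_left
  intro r hr
  rw [List.mem_range] at hr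
  apply List.map_congr_left
  intro c hc
  rw [List.mem_range] at hc
  by_cases h1 : r < t
  · rw [if_pos h1, if_pos (show r < t + 1 by omega)]
  · by_cases h2 : r = t
    · subst h2
      rw [if_neg h1, if_pos ⟨rfl, show c ≤ N by omega⟩, if_pos (show r < r + 1 by omega)]
    · have h3 : ¬ r < t + 1 := by omega
      rw [if_neg h1, if_neg (fun h => h2 h.1), if_neg h3]
      by_cases h5 : r = t + 1 ∧ c ≤ 0
      · rw [if_pos h5, show c = 0 from by omega, pvF_zero_right]
      · rw [if_neg h5]

theorem aStep_spec (arr : List (List Int)) (pts : PySem.Set (Int × Int)) (N t k : Nat)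
    (ht : t + 1 ≤ N) (hk : k + 1 ≤ N) :
    aStep arr pts (↑(t+1)) (pvE arr pts N (t+1) k) (↑(k+1))
      = pvE arr pts N (t+1) (k+1) := by
  simp only [aStep]
  have h1 : ((t+1 : Nat) : Int) - 1 = ((t : Nat) : Int) := by push_cast; ring
  have h2 : ((k+1 : Nat) : Int) - 1 = ((k : Nat) : Int) := by push_cast; ring
  rw [h1, h2,
      pvE_getD arr pts N (t+1) k t (k+1) (by omega) (by omega),
      pvE_getD arr pts N (t+1) k (t+1) k (by omega) (by omega),
      if_pos (show t < t+1 by omega),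
      if_neg (show ¬ (t+1 < t+1) by omega),
      if_pos (show (t+1 = t+1 ∧ k ≤ k) from ⟨rfl, le_refl k⟩),
      cascade_eq_pyMaxPair]
  have hval : (((pyMaxPair (pvF arr pts (t+1) k) (pvF arr pts t (k+1))).1
        + PySem.List.pyGetD (PySem.List.pyGetD arr (↑t) []) (↑k) 0),
        (if ((((t+1):Nat):Int), (((k+1):Nat):Int)) ∈ pts
         then (pyMaxPair (pvF arr pts (t+1) k) (pvF arr pts t (k+1))).2 + 1
         else (pyMaxPair (pvF arr pts (t+1) k) (pvF arr pts t (k+1))).2))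
      = pvF arr pts (t+1) (k+1) := by
    conv_rhs => rw [pvF]
    rw [show ((((t+1):Nat):Int), (((k+1):Nat):Int)) = ((((t:Nat):Int) + 1), (((k:Nat):Int) + 1)) by push_cast; rfl]
    by_cases hm : ((((t:Nat):Int) + 1), (((k:Nat):Int) + 1)) ∈ pts <;> simp [hm]
  rw [hval, pvE_row arr pts N (t+1) k (t+1) (by omega),
      PySem.List.pySetD_natCast, PySem.List.pySetD_natCast,
      set_map_range _ _ _ _ (show k+1 < N+1 by omega)]
  unfold pvE
  rw [set_map_range _ _ _ _ (show t+1 < N+1 by omega)]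
  apply List.map_congr_left
  intro r hr
  rw [List.mem_range] at hr
  by_cases hrt : r = t + 1
  · subst hrt
    rw [if_pos rfl]
    apply List.map_congr_left
    intro c hc
    rw [List.mem_range] at hc
    by_cases hck : c = k + 1
    · subst hck
      rw [if_pos rfl, if_neg (show ¬ (t+1 < t+1) by omega),
          if_pos (show (t+1 = t+1 ∧ k+1 ≤ k+1) from ⟨rfl, le_refl _⟩)]
    · rw [if_neg hck, if_neg (show ¬ (t+1 < t+1) by omega),
          if_neg (show ¬ (t+1 < t+1) by omega)]
      by_cases hck2 : c ≤ k
      · rw [if_pos ⟨rfl, hck2⟩, if_pos ⟨rfl, show c ≤ k+1 by omega⟩]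
      · rw [if_neg (by rintro ⟨-, h⟩; omega), if_neg (by rintro ⟨-, h⟩; omega)]
  · rw [if_neg hrt]
    apply List.map_congr_left
    intro c hc
    by_cases h1 : r < t + 1
    · rw [if_pos h1, if_pos h1]
    · rw [if_neg h1, if_neg h1,
          if_neg (by rintro ⟨h, -⟩; exact hrt h), if_neg (by rintro ⟨h, -⟩; exact hrt h)]

theorem aRow_inner (arr : List (List Int)) (pts : PySem.Set (Int × Int)) (N t : Nat)
    (ht : t + 1 ≤ N) :
    ∀ k : Nat, k ≤ N →
      (PySem.List.pyRange 1 ((k:Int)+1) 1).foldl (aStep arr pts (↑(t+1)))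
          (pvE arr pts N (t+1) 0)
        = pvE arr pts N (t+1) k := by
  intro k
  induction k with
  | zero =>
    intro _
    rw [show ((0:Nat):Int) + 1 = 1 by norm_num, PySem.List.pyRange_one_eq_nil (by omega)]
    rfl
  | succ k ih =>
    intro hk
    have hsplit : PySem.List.pyRange 1 (((k+1:Nat):Int)+1) 1
        = PySem.List.pyRange 1 ((k:Int)+1) 1 ++ [(k:Int)+1] := by
      have h : ((((k+1:Nat):Int))+1) = ((k:Int)+1) + 1 := by push_cast; ring
      rw [h, PySem.List.pyRange_one_succ_right (by omega)]
    rw [hsplit, List.foldl_append, ih (by omega)]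
    simp only [List.foldl_cons, List.foldl_nil]
    rw [show ((k:Int)+1) = ((k+1 : Nat) : Int) by push_cast; ring,
        aStep_spec arr pts N t k ht (by omega)]

theorem a_outer (arr : List (List Int)) (pts : PySem.Set (Int × Int)) (N : Nat) :
    ∀ t : Nat, t ≤ N →
      (PySem.List.pyRange 1 ((t:Int)+1) 1).foldl (aRow arr pts (↑N))
          (pvE arr pts N 0 0)
        = pvE arr pts N t N := by
  intro t
  induction t with
  | zero =>
    intro _
    rw [show ((0:Nat):Int) + 1 = 1 by norm_num, PySem.List.pyRange_one_eq_nil (by omega)]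
    simp only [List.foldl_nil]
    unfold pvE
    apply List.map_congr_left
    intro r hr
    apply List.map_congr_left
    intro c hc
    by_cases h : r = 0 <;> simp [h, pvF]
  | succ t ih =>
    intro ht
    have hsplit : PySem.List.pyRange 1 (((t+1:Nat):Int)+1) 1
        = PySem.List.pyRange 1 ((t:Int)+1) 1 ++ [(t:Int)+1] := by
      have h : ((((t+1:Nat):Int))+1) = ((t:Int)+1) + 1 := by push_cast; ring
      rw [h, PySem.List.pyRange_one_succ_right (by omega)]
    rw [hsplit, List.foldl_append, ih (by omega)]
    simp only [List.foldl_cons, List.foldl_nil]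
    rw [pvE_shift]
    unfold aRow
    rw [show ((t:Int)+1) = ((t+1 : Nat) : Int) by push_cast; ring]
    exact aRow_inner arr pts N t (by omega) N (le_refl N)

-- A's initial table is pvE N 0 0.
theorem dp0_eq (arr : List (List Int)) (pts : PySem.Set (Int × Int)) (N : Nat) :
    ((PySem.List.pyRange 0 ((N:Int)+1) 1).map (fun _ =>
      (PySem.List.pyRange 0 ((N:Int)+1) 1).map (fun _ => ((0:Int), (0:Int)))))
      = pvE arr pts N 0 0 := by
  unfold pvE
  apply List.ext_getElem
  · simp [PySem.List.length_pyRange_one]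
  · intro r h1 h2
    simp only [List.getElem_map, List.getElem_range]
    apply List.ext_getElem
    · simp [PySem.List.length_pyRange_one]
    · intro c h3 h4
      simp only [List.getElem_map, List.getElem_range]
      simp only [List.length_map, List.length_range] at h2 h4
      by_cases h : r = 0 <;> simp [h, pvF]

theorem both_eq_pvF (arr : List (List Int)) (n : Int) (m : Int) (p : List (Int × Int))
    (hn : 0 ≤ n) :
    matrix_path arr n m p = matrix_path_alt arr n m p := by
  simp only [matrix_path, matrix_path_alt]
  obtain ⟨N, rfl⟩ : ∃ N : Nat, n = (N : Int) := ⟨n.toNat, (Int.toNat_of_nonneg hn).symm⟩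
  rw [dp0_eq arr (PySem.Set.ofList p) N,
      a_outer arr (PySem.Set.ofList p) N N (le_refl N),
      pvE_getD arr (PySem.Set.ofList p) N N N N N (by omega) (by omega),
      if_neg (show ¬ (N < N) by omega),
      if_pos (show (N = N ∧ N ≤ N) from ⟨rfl, le_refl N⟩)]
  rw [show ((N:Int)).toNat = N by norm_num]
  exact ((solveB_correct arr (PySem.Set.ofList p) (N + N) N N rfl PySem.Dict.empty
    (by intro i j v hv; simp [PySem.Dict.get?_empty] at hv)).1).symm

-- ===== VERDICT (by name: the statement is the Claim_ definition above) =====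
theorem matrix_path_spec : Claim_equal_matrix_path := by
  intro arr n m p _ hpre
  unfold Spec_matrix_path
  exact both_eq_pvF arr n m p hpre.1
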